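-- pv_equiv track=rewrite | github.com/max7969/adventofcode2024 | day12/day12.py | compute_sides
-- ===== SOURCE A (Python) =====
-- small_square = [(0,0), (0,1), (1,1), (1,0)]
--
-- def compute_sides(borders):
--     sides = 0
--     min_x, max_x = min([border[0] for border in borders]), max([border[0] for border in borders])
--     min_y, max_y = min([border[1] for border in borders]), max([border[1] for border in borders])
--
--     for i in range(min_x - 1, max_x + 2):
--         for j in range(min_y - 1, max_y + 2):
--             count_borders = 0
--             for square in small_square:
--                 if (i + square[0], j + square[1]) in borders:
--                     count_borders += 1
--             if count_borders == 3:
--                 sides += 1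
--     return sides
-- ===== SOURCE B (Python) =====
-- small_square = [(0,0), (0,1), (1,1), (1,0)]
--
-- def compute_sides(borders):
--     bset = set(borders)
--     candidates = set()
--     for (x, y) in bset:
--         for (dx, dy) in small_square:
--             candidates.add((x - dx, y - dy))
--     sides = 0
--     for (i, j) in candidates:
--         count_borders = 0
--         for (dx, dy) in small_square:
--             if (i + dx, j + dy) in bset:
--                 count_borders += 1
--         if count_borders == 3:
--             sides += 1
--     return sides
-- ===== Notes on version B (the rewrite author's own statement) =====
-- stated objective: faster
-- what changed: B enumerates only the candidate 2x2 windows whose top-left corner is adjacent to some border cell (a set of at most 4*|borders| corners) and counts those with exactly 3 border cells, instead of A's scan of every window of the bounding box; Pre_ excludes only the empty input, on which A raises ValueError (min of an empty sequence).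
import Mathlib
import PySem

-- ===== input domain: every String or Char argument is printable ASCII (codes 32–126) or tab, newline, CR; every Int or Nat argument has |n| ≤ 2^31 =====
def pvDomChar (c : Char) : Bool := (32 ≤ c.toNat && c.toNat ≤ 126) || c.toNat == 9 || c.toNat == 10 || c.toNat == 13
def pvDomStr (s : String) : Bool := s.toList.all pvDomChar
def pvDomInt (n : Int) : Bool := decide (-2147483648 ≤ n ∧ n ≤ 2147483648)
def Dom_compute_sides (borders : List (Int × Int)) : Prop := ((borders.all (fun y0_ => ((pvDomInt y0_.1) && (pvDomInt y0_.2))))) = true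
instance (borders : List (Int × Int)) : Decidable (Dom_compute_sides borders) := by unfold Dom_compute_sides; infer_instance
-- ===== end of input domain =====

-- B enumerates only the 2x2 windows adjacent to some border cell (a set of candidate
-- top-left corners) instead of scanning the whole bounding box; exact same count.


-- ===== PORT A =====
def smallSquare : List (Int × Int) := [(0,0), (0,1), (1,1), (1,0)]

-- literal port of A; the `.getD 0` arms are only reached when borders = [] (Python: min() raises
-- ValueError there), which Pre_compute_sides excludes.
def compute_sides (borders : List (Int × Int)) : Int :=
  let min_x := (PySem.List.min? (borders.map (fun b => b.1)) (fun x => x)).getD 0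
  let max_x := (PySem.List.max? (borders.map (fun b => b.1)) (fun x => x)).getD 0
  let min_y := (PySem.List.min? (borders.map (fun b => b.2)) (fun x => x)).getD 0
  let max_y := (PySem.List.max? (borders.map (fun b => b.2)) (fun x => x)).getD 0
  (PySem.List.pyRange (min_x - 1) (max_x + 2) 1).foldl (fun sides i =>
    (PySem.List.pyRange (min_y - 1) (max_y + 2) 1).foldl (fun sides j =>
      let count_borders := smallSquare.foldl
        (fun c s => if (i + s.1, j + s.2) ∈ borders then c + 1 else c) (0 : Int)
      if count_borders = 3 then sides + 1 else sides) sides) 0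

-- ===== PORT B =====
def compute_sides_alt (borders : List (Int × Int)) : Int :=
  let bset : PySem.Set (Int × Int) := PySem.Set.ofList borders
  let candidates : PySem.Set (Int × Int) :=
    bset.foldl (fun cs b =>
      smallSquare.foldl (fun cs s => PySem.Set.add cs (b.1 - s.1, b.2 - s.2)) cs)
      PySem.Set.empty
  candidates.foldl (fun sides c =>
    let count_borders := smallSquare.foldl
      (fun n s => if (c.1 + s.1, c.2 + s.2) ∈ bset then n + 1 else n) (0 : Int)
    if count_borders = 3 then sides + 1 else sides) 0

-- ===== PRECONDITION & SPEC =====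
-- Pre_ excludes only the empty input, on which Python A raises ValueError (min of an empty list).
def Pre_compute_sides (borders : List (Int × Int)) : Prop := borders ≠ []
instance (borders : List (Int × Int)) : Decidable (Pre_compute_sides borders) := by unfold Pre_compute_sides; infer_instance
def pvWitness_compute_sides : (List (Int × Int)) := [(0, 0), (0, 1)]

def Spec_compute_sides (borders : List (Int × Int)) (out : Int) : Prop := out = compute_sides_alt borders
instance (borders : List (Int × Int)) (out : Int) : Decidable (Spec_compute_sides borders out) := by unfold Spec_compute_sides; infer_instance

-- ===== CLAIM (what is proved, stated in full; the proofs are below) =====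
def Claim_equal_compute_sides : Prop := ∀ (borders : List (Int × Int)), Dom_compute_sides borders → Pre_compute_sides borders → Spec_compute_sides borders (compute_sides borders)

-- ===== LEMMAS AND PROOFS =====

-- the per-window border count both programs compute (A tests membership in the list,
-- B in set(borders); the two tests agree)
def cntB (borders : List (Int × Int)) (c : Int × Int) : Int :=
  smallSquare.foldl (fun n s => if (c.1 + s.1, c.2 + s.2) ∈ borders then n + 1 else n) 0

def pcnt (borders : List (Int × Int)) (c : Int × Int) : Bool := decide (cntB borders c = 3)

lemma foldl_cnt_count (borders : List (Int × Int)) (L : List (Int × Int)) (a : Int) :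
    L.foldl (fun s c => if cntB borders c = 3 then s + 1 else s) a
      = a + (L.countP (pcnt borders) : Int) := by
  have h := PySem.List.foldl_count_if (pcnt borders) L a
  simpa [pcnt] using h

lemma cnt_three_exists {borders : List (Int × Int)} {c : Int × Int}
    (h : cntB borders c = 3) : ∃ s ∈ smallSquare, (c.1 + s.1, c.2 + s.2) ∈ borders := by
  by_contra hno
  push Not at hno
  have h1 := hno (0,0) (by simp [smallSquare])
  have h2 := hno (0,1) (by simp [smallSquare])
  have h3 := hno (1,1) (by simp [smallSquare])
  have h4 := hno (1,0) (by simp [smallSquare])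
  simp at h1 h2 h3 h4
  simp [cntB, smallSquare, List.foldl, h1, h2, h3, h4] at h

lemma nodup_foldl_add {α β : Type} [BEq α] [LawfulBEq α] (f : β → α) (l : List β)
    (s : PySem.Set α) (h : s.Nodup) :
    (l.foldl (fun s b => PySem.Set.add s (f b)) s).Nodup := by
  induction l generalizing s with
  | nil => exact h
  | cons x xs ih => exact ih _ (PySem.Set.nodup_add _ _ h)

lemma mem_foldl2_add (l : List (Int × Int)) (s : PySem.Set (Int × Int)) (y : Int × Int) :
    (y ∈ l.foldl (fun cs b =>
        smallSquare.foldl (fun cs s => PySem.Set.add cs (b.1 - s.1, b.2 - s.2)) cs) s)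
      ↔ y ∈ s ∨ ∃ b ∈ l, ∃ q ∈ smallSquare, y = (b.1 - q.1, b.2 - q.2) := by
  induction l generalizing s with
  | nil => simp
  | cons x xs ih =>
    simp only [List.foldl_cons, ih, PySem.Set.mem_foldl_add, List.mem_cons]
    constructor
    · rintro (( hy | ⟨q, hq, rfl⟩) | ⟨b, hb, q, hq, rfl⟩)
      · exact Or.inl hy
      · exact Or.inr ⟨x, Or.inl rfl, q, hq, rfl⟩
      · exact Or.inr ⟨b, Or.inr hb, q, hq, rfl⟩
    · rintro (hy | ⟨b, (rfl | hb), q, hq, rfl⟩)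
      · exact Or.inl (Or.inl hy)
      · exact Or.inl (Or.inr ⟨q, hq, rfl⟩)
      · exact Or.inr ⟨b, hb, q, hq, rfl⟩

lemma nodup_foldl2_add (l : List (Int × Int)) (s : PySem.Set (Int × Int)) (h : s.Nodup) :
    (l.foldl (fun cs b =>
        smallSquare.foldl (fun cs s => PySem.Set.add cs (b.1 - s.1, b.2 - s.2)) cs) s).Nodup := by
  induction l generalizing s with
  | nil => exact h
  | cons x xs ih => exact ih _ (nodup_foldl_add _ _ _ h)

theorem main_eq (borders : List (Int × Int)) (hne : borders ≠ []) :
    compute_sides borders = compute_sides_alt borders := by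
  classical
  simp only [compute_sides, compute_sides_alt]
  set mnx := (PySem.List.min? (borders.map (fun b => b.1)) (fun x => x)).getD 0 with hmnx
  set mxx := (PySem.List.max? (borders.map (fun b => b.1)) (fun x => x)).getD 0 with hmxx
  set mny := (PySem.List.min? (borders.map (fun b => b.2)) (fun x => x)).getD 0 with hmny
  set mxy := (PySem.List.max? (borders.map (fun b => b.2)) (fun x => x)).getD 0 with hmxy
  set cands := (PySem.Set.ofList borders).foldl (fun cs b =>
      smallSquare.foldl (fun cs s => PySem.Set.add cs (b.1 - s.1, b.2 - s.2)) cs)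
      (PySem.Set.empty : PySem.Set (Int × Int)) with hcands
  -- extremal bounds
  have hminx : ∀ b ∈ borders, mnx ≤ b.1 := by
    intro b hb
    rcases hmo : PySem.List.min? (borders.map (fun b => b.1)) (fun x => x) with _ | m
    · rw [PySem.List.min?_eq_none_iff] at hmo; simp_all
    · have := PySem.List.min?_isMin hmo b.1 (List.mem_map_of_mem hb)
      simpa [hmnx, hmo] using this
  have hmaxx : ∀ b ∈ borders, b.1 ≤ mxx := by
    intro b hb
    rcases hmo : PySem.List.max? (borders.map (fun b => b.1)) (fun x => x) with _ | m
    · rw [PySem.List.max?_eq_none_iff] at hmo; simp_all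
    · have := PySem.List.max?_isMax hmo b.1 (List.mem_map_of_mem hb)
      simpa [hmxx, hmo] using this
  have hminy : ∀ b ∈ borders, mny ≤ b.2 := by
    intro b hb
    rcases hmo : PySem.List.min? (borders.map (fun b => b.2)) (fun x => x) with _ | m
    · rw [PySem.List.min?_eq_none_iff] at hmo; simp_all
    · have := PySem.List.min?_isMin hmo b.2 (List.mem_map_of_mem hb)
      simpa [hmny, hmo] using this
  have hmaxy : ∀ b ∈ borders, b.2 ≤ mxy := by
    intro b hb
    rcases hmo : PySem.List.max? (borders.map (fun b => b.2)) (fun x => x) with _ | m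
    · rw [PySem.List.max?_eq_none_iff] at hmo; simp_all
    · have := PySem.List.max?_isMax hmo b.2 (List.mem_map_of_mem hb)
      simpa [hmxy, hmo] using this
  -- the scanned rectangle as a product list
  have hA : (PySem.List.pyRange (mnx - 1) (mxx + 2) 1).foldl (fun (sides : Int) i =>
      (PySem.List.pyRange (mny - 1) (mxy + 2) 1).foldl (fun sides j =>
        if smallSquare.foldl
            (fun c s => if (i + s.1, j + s.2) ∈ borders then c + 1 else c) (0 : Int) = 3
        then sides + 1 else sides) sides) (0 : Int)
      = ((PySem.List.pyRange (mnx - 1) (mxx + 2) 1 ×ˢ PySem.List.pyRange (mny - 1) (mxy + 2) 1).foldl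
          (fun s c => if cntB borders c = 3 then s + 1 else s) 0) := by
    rw [show (PySem.List.pyRange (mnx - 1) (mxx + 2) 1 ×ˢ PySem.List.pyRange (mny - 1) (mxy + 2) 1)
        = (PySem.List.pyRange (mnx - 1) (mxx + 2) 1).flatMap
            (fun i => (PySem.List.pyRange (mny - 1) (mxy + 2) 1).map (fun j => (i, j))) from rfl,
       List.foldl_flatMap]
    simp only [List.foldl_map]
    rfl
  have hB : cands.foldl (fun (sides : Int) c =>
      if smallSquare.foldl
          (fun n s => if (c.1 + s.1, c.2 + s.2) ∈ PySem.Set.ofList borders then n + 1 else n) (0 : Int) = 3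
      then sides + 1 else sides) (0 : Int)
      = cands.foldl (fun (s : Int) c => if cntB borders c = 3 then s + 1 else s) (0 : Int) := by
    have hfun : (fun (sides : Int) (c : Int × Int) =>
        if smallSquare.foldl
            (fun n s => if (c.1 + s.1, c.2 + s.2) ∈ PySem.Set.ofList borders then n + 1 else n) (0 : Int) = 3
        then sides + 1 else sides)
        = (fun (sides : Int) (c : Int × Int) => if cntB borders c = 3 then sides + 1 else sides) := by
      funext sides c
      simp [cntB, PySem.Set.mem_ofList]
    exact congrArg (fun f => List.foldl f (0 : Int) cands) hfun
  rw [hA, hB, foldl_cnt_count, foldl_cnt_count]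
  -- same number of windows with count 3
  congr 1
  norm_cast
  rw [List.countP_eq_length_filter, List.countP_eq_length_filter]
  apply List.Perm.length_eq
  have hnR : (PySem.List.pyRange (mnx - 1) (mxx + 2) 1 ×ˢ PySem.List.pyRange (mny - 1) (mxy + 2) 1).Nodup :=
    List.Nodup.product (PySem.List.nodup_pyRange_one _ _) (PySem.List.nodup_pyRange_one _ _)
  have hnC : cands.Nodup := nodup_foldl2_add _ _ (by simp [PySem.Set.empty])
  rw [List.perm_ext_iff_of_nodup (hnR.filter _) (hnC.filter _)]
  intro c
  simp only [List.mem_filter]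
  constructor
  · rintro ⟨-, hp⟩
    refine ⟨?_, hp⟩
    have h3 : cntB borders c = 3 := by simpa [pcnt] using hp
    obtain ⟨q, hq, hbmem⟩ := cnt_three_exists h3
    rw [hcands, mem_foldl2_add]
    refine Or.inr ⟨(c.1 + q.1, c.2 + q.2), (PySem.Set.mem_ofList borders _).mpr hbmem, q, hq, ?_⟩
    simp
  · rintro ⟨hc, hp⟩
    refine ⟨?_, hp⟩
    rw [hcands, mem_foldl2_add] at hc
    rcases hc with hc | ⟨b, hb, q, hq, rfl⟩
    · simp [PySem.Set.empty] at hc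
    · have hb' : b ∈ borders := (PySem.Set.mem_ofList borders b).mp hb
      have hq' : (q.1 = 0 ∨ q.1 = 1) ∧ (q.2 = 0 ∨ q.2 = 1) := by
        rcases q with ⟨q1, q2⟩
        simp [smallSquare] at hq
        rcases hq with h | h | h | h <;> simp [h.1, h.2]
      have h1 := hminx b hb'
      have h2 := hmaxx b hb'
      have h3 := hminy b hb'
      have h4 := hmaxy b hb'
      refine List.mem_product.mpr ⟨?_, ?_⟩
      · rw [PySem.List.mem_pyRange_one]
        show mnx - 1 ≤ b.1 - q.1 ∧ b.1 - q.1 < mxx + 2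
        omega
      · rw [PySem.List.mem_pyRange_one]
        show mny - 1 ≤ b.2 - q.2 ∧ b.2 - q.2 < mxy + 2
        omega

-- ===== VERDICT (by name: the statement is the Claim_ definition above) =====
theorem compute_sides_spec : Claim_equal_compute_sides := by
  intro borders _ hpre
  exact main_eq borders hpre
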